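-- pv_equiv track=rewrite | github.com/WallerTsai/OJ-Solution | leetcode-py/位运算/试填法/No3858.py | minimumOR
-- ===== SOURCE A (Python) =====
-- from typing import List
--
-- def minimumOR(grid: List[List[int]]) -> int:
--     mx = max(map(max, grid))
--     ans = 0
--     # 试填法：ans 的第 i 位能不能是 0？
--     # 如果在每一行的能选的数字中，都存在第 i 位是 0 的数，那么 ans 的第 i 位可以是 0，否则必须是 1
--     for i in range(mx.bit_length() - 1, -1, -1):
--         mask = ans | ((1 << i) - 1)  # mask 低于 i 的比特位全是 1，表示 grid[i][j] 的低位是 0 还是 1 无所谓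
--         for row in grid:
--             for x in row:
--                 # x 的高于 i 的比特位，如果 ans 是 0，那么 x 的这一位必须也是 0
--                 # x 的低于 i 的比特位，随意
--                 # x 的第 i 个比特位，我们期望它是 0
--                 if (x | mask) == mask:  # x 可以选，且第 i 位是 0
--                     break
--             else:  # 这一行的可选数字中，第 i 位全是 1
--                 ans |= 1 << i  # ans 第 i 位必须是 1
--                 break  # 填下一位
--     return ans  # 67ms
-- ===== SOURCE B (Python) =====
-- from typing import List
--
-- def minimumOR(grid: List[List[int]]) -> int:
--     mx = max(map(max, grid))
--     L = mx.bit_length()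
--     # per-row lists of still-viable candidates (numbers represent non-viable high bits are dropped up front)
--     cands = [[x for x in row if x >> L == 0] for row in grid]
--     ans = 0
--     for i in range(L - 1, -1, -1):
--         if all(any((x >> i) % 2 == 0 for x in row) for row in cands):
--             # every row can avoid bit i: keep it 0 and narrow the candidate lists
--             cands = [[x for x in row if (x >> i) % 2 == 0] for row in cands]
--         else:
--             ans |= 1 << i
--     return ans
-- ===== Notes on version B (the rewrite author's own statement) =====
-- stated objective: alternative
-- what changed: B keeps per-row candidate lists (seeded by dropping numbers with live high bits) that are narrowed after every bit decided 0, testing only the current bit of each candidate, instead of A's per-bit full-grid rescan with (x|mask)==mask.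
import Mathlib
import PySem

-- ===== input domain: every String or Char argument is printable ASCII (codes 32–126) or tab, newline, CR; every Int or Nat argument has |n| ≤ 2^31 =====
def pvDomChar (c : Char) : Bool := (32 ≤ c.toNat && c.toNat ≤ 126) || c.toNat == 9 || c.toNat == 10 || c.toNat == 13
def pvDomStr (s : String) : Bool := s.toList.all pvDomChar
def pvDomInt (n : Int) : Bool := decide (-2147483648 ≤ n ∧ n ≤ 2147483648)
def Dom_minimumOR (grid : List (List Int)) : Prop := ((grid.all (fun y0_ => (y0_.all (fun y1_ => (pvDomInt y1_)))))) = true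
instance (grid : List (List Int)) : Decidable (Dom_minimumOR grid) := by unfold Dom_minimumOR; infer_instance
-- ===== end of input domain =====

-- B replaces A's per-bit full-grid rescan with `(x|mask)==mask` by per-row candidate
-- lists that are narrowed after each bit decided 0 (objective: alternative decomposition).

-- ===== PORT A =====
-- max(map(max, grid)): under Pre_ (grid and all rows nonempty) no max? is none, so getD 0 never fires
def minimumOR (grid : List (List Int)) : Int :=
  let mx : Int := (PySem.List.max? (grid.map (fun r => (PySem.List.max? r id).getD 0)) id).getD 0
  (PySem.List.pyRange ((PySem.Int.bitLength mx : Int) - 1) (-1) (-1)).foldl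
    (fun (ans : Int) (i : Int) =>
      let mask : Int := PySem.Int.bor ans ((1 <<< i.toNat) - 1)
      -- for row in grid: for x in row: if (x|mask)==mask: break / else: ans |= 1<<i; break
      -- = if some row has no x with (x|mask)==mask then ans |= 1<<i
      if grid.any (fun row => row.all (fun x => !(PySem.Int.bor x mask == mask))) then
        PySem.Int.bor ans (1 <<< i.toNat)
      else ans) 0

-- ===== PORT B =====
def minimumOR_alt (grid : List (List Int)) : Int :=
  let mx : Int := (PySem.List.max? (grid.map (fun r => (PySem.List.max? r id).getD 0)) id).getD 0
  let L : Nat := PySem.Int.bitLength mx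
  -- per-row candidate lists; numbers with live high bits beyond L are dropped up front
  let cands : List (List Int) := grid.map (fun row => row.filter (fun x => x >>> L == 0))
  ((PySem.List.pyRange ((L : Int) - 1) (-1) (-1)).foldl
    (fun (st : Int × List (List Int)) (i : Int) =>
      if st.2.all (fun row => row.any (fun x => PySem.Int.mod (x >>> i.toNat) 2 == 0)) then
        (st.1, st.2.map (fun row => row.filter (fun x => PySem.Int.mod (x >>> i.toNat) 2 == 0)))
      else (PySem.Int.bor st.1 (1 <<< i.toNat), st.2)) ((0 : Int), cands)).1

-- ===== PRECONDITION & SPEC =====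
-- Pre_ excludes exactly the inputs where Python A raises ValueError: an empty grid or an
-- empty row (max() of an empty sequence); Python B raises there too.
def Pre_minimumOR (grid : List (List Int)) : Prop := grid ≠ [] ∧ ∀ row ∈ grid, row ≠ []
instance (grid : List (List Int)) : Decidable (Pre_minimumOR grid) := by unfold Pre_minimumOR; infer_instance
def pvWitness_minimumOR : List (List Int) := [[1, 5], [3]]
def Spec_minimumOR (grid : List (List Int)) (out : Int) : Prop := out = minimumOR_alt grid
instance (grid : List (List Int)) (out : Int) : Decidable (Spec_minimumOR grid out) := by unfold Spec_minimumOR; infer_instance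

-- ===== CLAIM (what is proved, stated in full; the proofs are below) =====
def Claim_equal_minimumOR : Prop := ∀ (grid : List (List Int)), Dom_minimumOR grid → Pre_minimumOR grid → Spec_minimumOR grid (minimumOR grid)

-- ===== LEMMAS AND PROOFS =====

-- the two fold bodies, named for the proofs (definitionally the ones in the ports)
def stepA (grid : List (List Int)) : Int → Int → Int := fun ans i =>
  let mask : Int := PySem.Int.bor ans ((1 <<< i.toNat) - 1)
  if grid.any (fun row => row.all (fun x => !(PySem.Int.bor x mask == mask))) then
    PySem.Int.bor ans (1 <<< i.toNat)
  else ans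

def stepB : Int × List (List Int) → Int → Int × List (List Int) := fun st i =>
  if st.2.all (fun row => row.any (fun x => PySem.Int.mod (x >>> i.toNat) 2 == 0)) then
    (st.1, st.2.map (fun row => row.filter (fun x => PySem.Int.mod (x >>> i.toNat) 2 == 0)))
  else (PySem.Int.bor st.1 (1 <<< i.toNat), st.2)

theorem pyRangeDown (n : Nat) : PySem.List.pyRange ((n:Int) - 1) (-1) (-1) = (List.range n).map (fun k : Nat => (n:Int) - 1 - (k:Int)) := by
  simp only [PySem.List.pyRange]
  norm_num
  split
  · apply List.map_congr_left
    intro k hk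
    ring
  · next hge =>
    have : n = 0 := by omega
    subst this; simp

theorem pyRangeDown_succ (n : Nat) : PySem.List.pyRange (((n+1 : Nat) : Int) - 1) (-1) (-1) = (n : Int) :: PySem.List.pyRange ((n:Int) - 1) (-1) (-1) := by
  rw [pyRangeDown, pyRangeDown, List.range_succ_eq_map]
  simp only [List.map_cons, List.map_map]
  congr 1
  · push_cast; ring
  · apply List.map_congr_left
    intro k hk
    simp only [Function.comp]
    push_cast; ring

theorem orEq (a m : Nat) : a ||| m = m ↔ ∀ j, a.testBit j = true → m.testBit j = true := by
  constructor
  · intro h j hj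
    rw [← h]; simp [hj]
  · intro h
    apply Nat.eq_of_testBit_eq
    intro j
    simp only [Nat.testBit_lor]
    cases ha : a.testBit j
    · simp
    · simp [h j ha]

theorem maskBit (ans i j : Nat) : (ans ||| (2^i - 1)).testBit j = (ans.testBit j || decide (j < i)) := by
  simp [Nat.testBit_two_pow_sub_one]

theorem natSplit (ans n a : Nat) (h : ∀ j, j < n+1 → ans.testBit j = false) :
    a ||| (ans ||| (2^n - 1)) = ans ||| (2^n - 1) ↔
    (a ||| (ans ||| (2^(n+1) - 1)) = ans ||| (2^(n+1) - 1) ∧ a.testBit n = false) := by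
  rw [orEq, orEq]
  constructor
  · intro hq
    refine ⟨fun j hj => ?_, ?_⟩
    · have := hq j hj
      rw [maskBit] at this ⊢
      rcases Bool.or_eq_true_iff.1 this with h1 | h1
      · simp [h1]
      · simp at h1; simp; omega
    · cases hb : a.testBit n
      · rfl
      · have := hq n hb
        rw [maskBit] at this
        rcases Bool.or_eq_true_iff.1 this with h1 | h1
        · rw [h n (by omega)] at h1; exact absurd h1 (by simp)
        · simp at h1
  · rintro ⟨hq, hbn⟩ j hj
    have := hq j hj
    rw [maskBit] at this ⊢
    rcases Bool.or_eq_true_iff.1 this with h1 | h1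
    · simp [h1]
    · simp at h1
      by_cases hjn : j < n
      · simp [hjn]
      · have : j = n := by omega
        subst this
        rw [hbn] at hj; exact absurd hj (by simp)

theorem maskMerge (ans n : Nat) : (ans ||| 2^n) ||| (2^n - 1) = ans ||| (2^(n+1) - 1) := by
  apply Nat.eq_of_testBit_eq
  intro j
  simp only [Nat.testBit_lor, Nat.testBit_two_pow, Nat.testBit_two_pow_sub_one]
  cases hb : ans.testBit j
  · simp only [Bool.false_or]
    by_cases h1 : j < n
    · simp [h1]; omega
    · by_cases h2 : j = n <;> simp [h1, h2] <;> omega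
  · simp

-- a negative Python int never satisfies (x | mask) == mask for a nonnegative mask
theorem condNeg (x : Int) (m : Nat) (hx : x < 0) : (PySem.Int.bor x (m:Int) == (m:Int)) = false := by
  simp only [beq_eq_false_iff_ne, ne_eq]
  intro hEq
  have hneg : PySem.Int.bor x (m:Int) < 0 := by
    simp only [PySem.Int.bor]
    rw [if_neg (by omega), if_pos (by positivity)]
    omega
  rw [hEq] at hneg
  omega

theorem natShiftCast (a n : Nat) : ((a:Int) >>> n) = ((a >>> n : Nat) : Int) := by
  simp [Int.shiftRight_eq_div_pow, Nat.shiftRight_eq_div_pow]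

theorem shiftNeg (x : Int) (L : Nat) (hx : x < 0) : x >>> L < 0 := by
  rw [Int.shiftRight_eq_div_pow]
  exact Int.ediv_neg_of_neg_of_pos hx (by positivity)

theorem modTwoCast (k : Nat) : PySem.Int.mod (k:Int) 2 = ((k % 2 : Nat) : Int) := by
  exact_mod_cast PySem.Int.mod_natCast k 2

theorem castPowSub (n : Nat) : (((2^n : Nat) : Int)) - 1 = ((2^n - 1 : Nat) : Int) := by
  have h2 : (1:Nat) ≤ 2^n := Nat.one_le_two_pow
  push_cast [h2]
  ring

-- qualification at bit n splits into qualification at boundary n+1 plus "bit n is 0"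
theorem intSplit (ans n : Nat) (h : ∀ j, j < n+1 → ans.testBit j = false) (x : Int) :
    (PySem.Int.bor x ((ans ||| (2^n - 1) : Nat) : Int) == ((ans ||| (2^n - 1) : Nat) : Int))
    = ((PySem.Int.bor x ((ans ||| (2^(n+1) - 1) : Nat) : Int) == ((ans ||| (2^(n+1) - 1) : Nat) : Int))
        && (PySem.Int.mod (x >>> n) 2 == 0)) := by
  rcases lt_or_ge x 0 with hx | hx
  · rw [condNeg x _ hx, condNeg x _ hx]
    rfl
  · obtain ⟨a, rfl⟩ := Int.eq_ofNat_of_zero_le hx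
    rw [PySem.Int.bor_natCast, PySem.Int.bor_natCast, natShiftCast, modTwoCast]
    rw [Bool.eq_iff_iff]
    simp only [beq_iff_eq, Bool.and_eq_true, Nat.cast_inj, Nat.cast_eq_zero]
    rw [natSplit ans n a h]
    have hb : a.testBit n = false ↔ (a >>> n) % 2 = 0 := by
      rw [Nat.testBit_eq_decide_div_mod_eq, Nat.shiftRight_eq_div_pow]
      rcases Nat.mod_two_eq_zero_or_one (a / 2^n) with h0 | h0 <;> simp [h0]
    rw [hb]

-- B's up-front filter is A's qualification with the all-ones starting mask
theorem initFilter (L : Nat) (x : Int) :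
    (x >>> L == 0) = (PySem.Int.bor x ((2^L - 1 : Nat) : Int) == ((2^L - 1 : Nat) : Int)) := by
  rcases lt_or_ge x 0 with hx | hx
  · rw [condNeg x _ hx]
    have := shiftNeg x L hx
    simp only [beq_eq_false_iff_ne, ne_eq]
    omega
  · obtain ⟨a, rfl⟩ := Int.eq_ofNat_of_zero_le hx
    rw [natShiftCast, PySem.Int.bor_natCast, Bool.eq_iff_iff]
    simp only [beq_iff_eq, Nat.cast_eq_zero, Nat.cast_inj]
    rw [Nat.shiftRight_eq_div_pow, Nat.div_eq_zero_iff]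
    constructor
    · rintro (h0 | hlt)
      · exact absurd h0 (by positivity)
      · rw [orEq]
        intro j hj
        by_cases hjL : j < L
        · rw [Nat.testBit_two_pow_sub_one]; simp [hjL]
        · have : a < 2^j := lt_of_lt_of_le hlt (Nat.pow_le_pow_right (by omega) (by omega))
          rw [Nat.testBit_eq_false_of_lt this] at hj
          exact absurd hj (by simp)
    · intro hEq
      right
      have : a ≤ a ||| (2^L - 1) := Nat.left_le_or
      rw [hEq] at this
      have h2 : (1:Nat) ≤ 2^L := Nat.one_le_two_pow
      omega

-- main loop invariant: B's candidate lists are A's rows filtered by the boundary mask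
theorem mainLoop (grid : List (List Int)) (n : Nat) : ∀ (ans : Nat),
    (∀ j, j < n → ans.testBit j = false) →
    (PySem.List.pyRange ((n:Int) - 1) (-1) (-1)).foldl (stepA grid) (ans : Int)
    = ((PySem.List.pyRange ((n:Int) - 1) (-1) (-1)).foldl stepB
        ((ans : Int), grid.map (fun row => row.filter
          (fun x => PySem.Int.bor x ((ans ||| (2^n - 1) : Nat) : Int) == ((ans ||| (2^n - 1) : Nat) : Int))))).1 := by
  induction n with
  | zero =>
    intro ans h
    rw [show ((0:Nat):Int) - 1 = -1 by norm_num]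
    rw [show PySem.List.pyRange (-1) (-1) (-1) = [] by decide]
    simp
  | succ n ih =>
    intro ans h
    rw [pyRangeDown_succ]
    simp only [List.foldl_cons]
    have htoNat : ((n:Int)).toNat = n := Int.toNat_natCast n
    have hmaskA : PySem.Int.bor (ans : Int) (((1 <<< n : Nat) : Int) - 1) = ((ans ||| (2^n - 1) : Nat) : Int) := by
      rw [Nat.one_shiftLeft, castPowSub, PySem.Int.bor_natCast]
    have hsplit := intSplit ans n h
    -- the two branch conditions are complementary
    have hcond :
        (grid.any (fun row => row.all (fun x =>
            !(PySem.Int.bor x ((ans ||| (2^n - 1) : Nat) : Int) == ((ans ||| (2^n - 1) : Nat) : Int)))))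
        = !((grid.map (fun row => row.filter
              (fun x => PySem.Int.bor x ((ans ||| (2^(n+1) - 1) : Nat) : Int) == ((ans ||| (2^(n+1) - 1) : Nat) : Int)))).all
            (fun row => row.any (fun x => PySem.Int.mod (x >>> n) 2 == 0))) := by
      rw [List.all_map]
      simp only [Function.comp_def, List.any_filter]
      have hpt : ∀ x : Int,
          ((PySem.Int.bor x ((ans ||| (2^(n+1) - 1) : Nat) : Int) == ((ans ||| (2^(n+1) - 1) : Nat) : Int))
            && (PySem.Int.mod (x >>> n) 2 == 0))
          = (PySem.Int.bor x ((ans ||| (2^n - 1) : Nat) : Int) == ((ans ||| (2^n - 1) : Nat) : Int)) := by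
        intro x; rw [hsplit x]
      simp only [hpt]
      simp only [← List.not_any_eq_all_not, ← List.not_all_eq_any_not]
    simp only [stepA, stepB, htoNat]
    rw [hmaskA, hcond]
    by_cases hC : ((grid.map (fun row => row.filter
          (fun x => PySem.Int.bor x ((ans ||| (2^(n+1) - 1) : Nat) : Int) == ((ans ||| (2^(n+1) - 1) : Nat) : Int)))).all
        (fun row => row.any (fun (x : Int) => PySem.Int.mod (x >>> n) 2 == 0))) = true
    · rw [hC]
      simp only [Bool.not_true, Bool.false_eq_true, if_false, if_pos]
      have hfilters : ((grid.map (fun row => row.filter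
            (fun x => PySem.Int.bor x ((ans ||| (2^(n+1) - 1) : Nat) : Int) == ((ans ||| (2^(n+1) - 1) : Nat) : Int)))).map
          (fun row => row.filter (fun (x : Int) => PySem.Int.mod (x >>> n) 2 == 0)))
          = grid.map (fun row => row.filter
            (fun x => PySem.Int.bor x ((ans ||| (2^n - 1) : Nat) : Int) == ((ans ||| (2^n - 1) : Nat) : Int))) := by
        simp only [List.map_map, Function.comp_def, List.filter_filter]
        apply List.map_congr_left
        intro row _
        apply List.filter_congr
        intro x _
        rw [Bool.and_comm]
        exact (hsplit x).symm
      rw [hfilters]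
      exact ih ans (fun j hj => h j (by omega))
    · rw [Bool.not_eq_true] at hC
      rw [hC]
      simp only [Bool.not_false, if_true, Bool.false_eq_true, if_false]
      have hbor : PySem.Int.bor (ans : Int) ((1 <<< n : Nat) : Int) = (((ans ||| 2^n : Nat)) : Int) := by
        rw [Nat.one_shiftLeft, PySem.Int.bor_natCast]
      rw [hbor]
      have h2 : ∀ j, j < n → (ans ||| 2^n).testBit j = false := by
        intro j hj
        simp only [Nat.testBit_lor, Nat.testBit_two_pow]
        rw [h j (by omega)]
        simp
        omega
      have := ih (ans ||| 2^n) h2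
      rw [maskMerge] at this
      exact this

theorem initRow (L : Nat) (row : List Int) :
    row.filter (fun (x : Int) => x >>> L == 0)
    = row.filter (fun x => PySem.Int.bor x (((0 : Nat) ||| (2^L - 1) : Nat) : Int) == (((0 : Nat) ||| (2^L - 1) : Nat) : Int)) := by
  apply List.filter_congr
  intro x _
  rw [Nat.zero_or]
  exact initFilter L x

-- ===== VERDICT (by name: the statement is the Claim_ definition above) =====
theorem minimumOR_spec : Claim_equal_minimumOR := by
  unfold Claim_equal_minimumOR Spec_minimumOR
  intro grid _ _
  have hA : minimumOR grid = List.foldl (stepA grid) 0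
      (PySem.List.pyRange ((PySem.Int.bitLength ((PySem.List.max? (grid.map (fun r => (PySem.List.max? r id).getD 0)) id).getD 0) : Int) - 1) (-1) (-1)) := rfl
  have hB : minimumOR_alt grid = (List.foldl stepB (0,
      grid.map (fun row => row.filter (fun (x : Int) => x >>> (PySem.Int.bitLength ((PySem.List.max? (grid.map (fun r => (PySem.List.max? r id).getD 0)) id).getD 0)) == 0)))
      (PySem.List.pyRange ((PySem.Int.bitLength ((PySem.List.max? (grid.map (fun r => (PySem.List.max? r id).getD 0)) id).getD 0) : Int) - 1) (-1) (-1))).1 := rfl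
  rw [hA, hB]
  have h0 := mainLoop grid (PySem.Int.bitLength ((PySem.List.max? (grid.map (fun r => (PySem.List.max? r id).getD 0)) id).getD 0)) 0 (by simp)
  rw [Nat.cast_zero] at h0
  simp only [← initRow] at h0
  exact h0
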